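-- pv_equiv track=rewrite | github.com/shuaiwang534/air | text_flow/paragraph_chunks.py | _collapse_repeated_long_cells
-- ===== SOURCE A (Python) =====
-- def _clean_table_text(value):
--     if value is None:
--         return ""
--     text = str(value).replace("\r\n", "\n").replace("\r", "\n")
--     parts = [x.strip() for x in text.split("\n") if x.strip()]
--     return " ".join(parts).strip()
--
-- def _collapse_repeated_long_cells(cells, min_len=16):
--     """
--     Handle merged-like horizontal repeats from some Word tables:
--     if adjacent columns contain exactly the same long text, keep the first one
--     and clear the trailing duplicates.
--     """
--     out = list(cells)
--     n = len(out)
--     i = 0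
--     while i < n:
--         cur = _clean_table_text(out[i])
--         if not cur:
--             i += 1
--             continue
--
--         j = i + 1
--         while j < n and _clean_table_text(out[j]) == cur:
--             j += 1
--
--         if (j - i) >= 2 and len(cur) >= int(min_len):
--             for k in range(i + 1, j):
--                 out[k] = ""
--
--         i = j
--     return out
-- ===== SOURCE B (Python) =====
-- def _clean_table_text(value):
--     if value is None:
--         return ""
--     text = str(value).replace("\r\n", "\n").replace("\r", "\n")
--     parts = [x.strip() for x in text.split("\n") if x.strip()]
--     return " ".join(parts).strip()
--
-- def _collapse_repeated_long_cells(cells, min_len=16):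
--     # Single flat pass: a cell is cleared exactly when its cleaned text is
--     # non-empty, long enough, and equal to the previous cell's cleaned text.
--     out = []
--     prev = ""
--     m = int(min_len)
--     for c in cells:
--         cur = _clean_table_text(c)
--         if cur and cur == prev and len(cur) >= m:
--             out.append("")
--         else:
--             out.append(c)
--         prev = cur
--     return out
-- ===== Notes on version B (the rewrite author's own statement) =====
-- stated objective: simpler
-- what changed: Replaced A's nested while-loops with index jumps and in-place range clears by one flat pass that compares each cell's cleaned text with the previous cell's cleaned text; each cell is cleaned exactly once instead of twice (once as a run head, once in the inner scan).
import Mathlib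
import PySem

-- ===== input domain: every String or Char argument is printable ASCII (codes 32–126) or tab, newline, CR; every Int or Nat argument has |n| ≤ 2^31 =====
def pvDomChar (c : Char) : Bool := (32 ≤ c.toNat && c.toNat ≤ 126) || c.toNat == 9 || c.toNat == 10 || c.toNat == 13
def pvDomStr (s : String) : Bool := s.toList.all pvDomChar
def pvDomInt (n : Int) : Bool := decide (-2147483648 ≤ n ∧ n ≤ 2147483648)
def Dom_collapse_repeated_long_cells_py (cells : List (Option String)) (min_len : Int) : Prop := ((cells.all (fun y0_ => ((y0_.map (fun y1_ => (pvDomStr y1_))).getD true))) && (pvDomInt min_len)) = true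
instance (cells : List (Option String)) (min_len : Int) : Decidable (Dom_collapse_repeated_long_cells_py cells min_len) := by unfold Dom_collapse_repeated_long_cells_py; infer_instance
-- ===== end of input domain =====

-- B replaces A's nested while-loops (run detection + in-place range clearing) by one flat
-- previous-cleaned-cell pass; objective: simpler, same cost.

-- ===== PORT A =====
-- _clean_table_text (shared helper of both Python files)
def cleanCell (value : Option String) : String :=
  match value with
  | none => ""
  | some s =>
    let text := PySem.Str.replace (PySem.Str.replace s "\r\n" "\n") "\r" "\n"
    -- split? is `some` here since the separator "\n" is non-empty
    let parts := (((PySem.Str.split? text "\n").getD []).map PySem.Str.strip).filter (fun x => ¬ (x = ""))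
    PySem.Str.strip (PySem.Str.join " " parts)

-- inner `while j < n and _clean_table_text(out[j]) == cur: j += 1`
-- (out[j] with 0 ≤ j < n is exact as `getD j none`)
def findJ (out : List (Option String)) (n : Nat) (cur : String) (j : Nat) : Nat :=
  if h : j < n ∧ cleanCell (out.getD j none) = cur then findJ out n cur (j + 1) else j
termination_by n - j
decreasing_by omega

-- `for k in range(i + 1, j): out[k] = ""`
def clearK (out : List (Option String)) (k j : Nat) : List (Option String) :=
  if h : k < j then clearK (out.set k (some "")) (k + 1) j else out
termination_by j - k

-- outer `while i < n` (fuel: i grows by ≥ 1 per iteration, so n steps always suffice)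
def aLoop (ml : Int) (n : Nat) (fuel : Nat) (i : Nat) (out : List (Option String)) : List (Option String) :=
  match fuel with
  | 0 => out
  | fuel + 1 =>
    if i < n then
      let cur := cleanCell (out.getD i none)
      if cur = "" then aLoop ml n fuel (i + 1) out
      else
        let j := findJ out n cur (i + 1)
        let out' := if 2 ≤ j - i ∧ ml ≤ (PySem.Str.len cur : Int) then clearK out (i + 1) j else out
        aLoop ml n fuel j out'
    else out

def collapse_repeated_long_cells_py (cells : List (Option String)) (min_len : Int) : List (Option String) :=
  aLoop min_len cells.length cells.length 0 cells

-- ===== PORT B =====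
-- flat pass: clear a cell iff its cleaned text is non-empty, equals the previous cell's
-- cleaned text and is long enough (`int(min_len)` is the identity on an int)
def bGo (ml : Int) (prev : String) : List (Option String) → List (Option String)
  | [] => []
  | c :: rest =>
    let cur := cleanCell c
    (if ¬ (cur = "") ∧ cur = prev ∧ ml ≤ (PySem.Str.len cur : Int) then some "" else c) :: bGo ml cur rest

def collapse_repeated_long_cells_py_alt (cells : List (Option String)) (min_len : Int) : List (Option String) :=
  bGo min_len "" cells

-- ===== PRECONDITION & SPEC =====
def Spec_collapse_repeated_long_cells_py (cells : List (Option String)) (min_len : Int) (out : List (Option String)) : Prop := out = collapse_repeated_long_cells_py_alt cells min_len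
instance (cells : List (Option String)) (min_len : Int) (out : List (Option String)) : Decidable (Spec_collapse_repeated_long_cells_py cells min_len out) := by unfold Spec_collapse_repeated_long_cells_py; infer_instance

-- ===== CLAIM (what is proved, stated in full; the proofs are below) =====
def Claim_equal_collapse_repeated_long_cells_py : Prop := ∀ (cells : List (Option String)) (min_len : Int), Dom_collapse_repeated_long_cells_py cells min_len → Spec_collapse_repeated_long_cells_py cells min_len (collapse_repeated_long_cells_py cells min_len)

-- ===== LEMMAS AND PROOFS =====

theorem getD_append_len (l r : List (Option String)) (c d : Option String) :
    (l ++ c :: r).getD l.length d = c := by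
  simp [List.getD]

theorem set_append_len (l r : List (Option String)) (c y : Option String) :
    (l ++ c :: r).set l.length y = l ++ y :: r := by
  induction l with
  | nil => simp
  | cons a t ih => simp [ih]

theorem findJ_eq (out : List (Option String)) (cur : String) :
    ∀ (m j : Nat), out.length - j ≤ m → j ≤ out.length →
      findJ out out.length cur j =
        j + ((out.drop j).takeWhile (fun x => cleanCell x = cur)).length := by
  intro m
  induction m with
  | zero =>
    intro j hm hj
    have hje : j = out.length := by omega
    subst hje
    rw [findJ]
    simp [List.drop_length]
  | succ m ih =>
    intro j hm hj
    rw [findJ]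
    by_cases h : j < out.length ∧ cleanCell (out.getD j none) = cur
    · rw [dif_pos h]
      obtain ⟨h1, h2⟩ := h
      rw [ih (j + 1) (by omega) (by omega)]
      rw [List.drop_eq_getElem_cons h1, List.takeWhile_cons]
      rw [List.getD_eq_getElem?_getD, List.getElem?_eq_getElem h1] at h2
      simp only [Option.getD_some] at h2
      simp [h2]
      omega
    · rw [dif_neg h]
      by_cases hj2 : j < out.length
      · have h2 : ¬ cleanCell (out.getD j none) = cur := fun hc => h ⟨hj2, hc⟩
        rw [List.getD_eq_getElem?_getD, List.getElem?_eq_getElem hj2] at h2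
        simp only [Option.getD_some] at h2
        rw [List.drop_eq_getElem_cons hj2, List.takeWhile_cons]
        simp [h2]
      · have hje : j = out.length := by omega
        subst hje
        simp [List.drop_length]

theorem clearK_spec (seg : List (Option String)) (post : List (Option String)) :
    ∀ (p : List (Option String)),
    clearK (p ++ seg ++ post) p.length (p.length + seg.length) =
      p ++ seg.map (fun _ => (some "" : Option String)) ++ post := by
  induction seg with
  | nil => intro p; rw [clearK, dif_neg (by simp)]; simp
  | cons s seg' ih =>
    intro p
    rw [clearK, dif_pos (by simp)]
    have hset : (p ++ (s :: seg') ++ post).set p.length (some "") = p ++ (some "" :: seg') ++ post := by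
      have h := set_append_len p (seg' ++ post) s (some "")
      simp only [List.append_assoc, List.cons_append] at h ⊢
      exact h
    rw [hset]
    have h2 := ih (p ++ [some ""])
    simp only [List.length_append, List.length_cons, List.length_nil] at h2 ⊢
    have harr : (p ++ [some ""]) ++ seg' ++ post = p ++ (some "" :: seg') ++ post := by simp
    rw [harr] at h2
    have he : p.length + 1 + seg'.length = p.length + (seg'.length + 1) := by omega
    rw [he] at h2
    rw [h2]
    simp

theorem bGo_run_clear (ml : Int) (cur : String) (run rest : List (Option String))
    (hrun : ∀ x ∈ run, cleanCell x = cur) (hne : ¬ (cur = ""))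
    (hlen : ml ≤ (PySem.Str.len cur : Int)) :
    bGo ml cur (run ++ rest) = run.map (fun _ => (some "" : Option String)) ++ bGo ml cur rest := by
  induction run with
  | nil => simp
  | cons x run' ih =>
    have hx : cleanCell x = cur := hrun x (by simp)
    rw [List.cons_append, bGo]
    simp only [hx]
    rw [if_pos ⟨hne, trivial, hlen⟩]
    rw [ih (fun y hy => hrun y (by simp [hy]))]
    simp

theorem bGo_run_keep (ml : Int) (cur : String) (run rest : List (Option String))
    (hrun : ∀ x ∈ run, cleanCell x = cur)
    (hlen : ¬ ml ≤ (PySem.Str.len cur : Int)) :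
    bGo ml cur (run ++ rest) = run ++ bGo ml cur rest := by
  induction run with
  | nil => simp
  | cons x run' ih =>
    have hx : cleanCell x = cur := hrun x (by simp)
    rw [List.cons_append, bGo]
    simp only [hx]
    rw [if_neg (by intro hc; exact hlen hc.2.2)]
    rw [ih (fun y hy => hrun y (by simp [hy]))]
    simp

theorem head?_dropWhile_not (p : Option String → Bool) (l : List (Option String))
    (c : Option String) (h : (l.dropWhile p).head? = some c) : ¬ p c := by
  intro hp
  induction l with
  | nil => simp at h
  | cons a t ih =>
    rw [List.dropWhile_cons] at h
    split at h
    · exact ih h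
    · simp_all

theorem aLoop_skip (ml : Int) (n fuel i : Nat) (out : List (Option String))
    (hin : i < n) (hcur : cleanCell (out.getD i none) = "") :
    aLoop ml n (fuel + 1) i out = aLoop ml n fuel (i + 1) out := by
  rw [aLoop, if_pos hin, if_pos hcur]

theorem aLoop_step (ml : Int) (n fuel i : Nat) (out : List (Option String)) (J : Nat)
    (hin : i < n) (hcur : ¬ cleanCell (out.getD i none) = "")
    (hJ : J = findJ out n (cleanCell (out.getD i none)) (i + 1)) :
    aLoop ml n (fuel + 1) i out =
      aLoop ml n fuel J
        (if 2 ≤ J - i ∧ ml ≤ (PySem.Str.len (cleanCell (out.getD i none)) : Int)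
         then clearK out (i + 1) J else out) := by
  subst hJ
  rw [aLoop, if_pos hin, if_neg hcur]

theorem aLoop_main (ml : Int) :
    ∀ (fuel : Nat) (rest done : List (Option String)) (prev : String),
      rest.length ≤ fuel →
      (∀ c, rest.head? = some c → (prev = "" ∨ ¬ (cleanCell c = prev))) →
      aLoop ml (done.length + rest.length) fuel done.length (done ++ rest) =
        done ++ bGo ml prev rest := by
  intro fuel
  induction fuel with
  | zero =>
    intro rest done prev hf _
    have hnil : rest = [] := by
      cases rest with
      | nil => rfl
      | cons a t => simp at hf
    subst hnil
    simp [aLoop, bGo]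
  | succ fuel ih =>
    intro rest done prev hf hhead
    cases rest with
    | nil => simp [aLoop, bGo]
    | cons c rest' =>
      have hgd : (done ++ c :: rest').getD done.length none = c := getD_append_len done rest' c none
      by_cases hcur : cleanCell c = ""
      · rw [aLoop_skip ml _ fuel done.length (done ++ c :: rest') (by simp) (by rw [hgd]; exact hcur)]
        have h1 : done ++ c :: rest' = (done ++ [c]) ++ rest' := by simp
        have h2 : done.length + (c :: rest').length = (done ++ [c]).length + rest'.length := by
          simp; omega
        have h3 : done.length + 1 = (done ++ [c]).length := by simp
        rw [h1, h2, h3]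
        rw [ih rest' (done ++ [c]) "" (by simp at hf ⊢; omega) (fun d _ => Or.inl rfl)]
        rw [bGo]
        rw [if_neg (by intro hc; exact hc.1 hcur)]
        rw [hcur]
        simp
      · set p : Option String → Bool := fun x => decide (cleanCell x = cleanCell c) with hp
        have hsplit : rest'.takeWhile p ++ rest'.dropWhile p = rest' := List.takeWhile_append_dropWhile
        set run := rest'.takeWhile p with hrundef
        set rest₂ := rest'.dropWhile p with hrest2def
        have hout : done ++ c :: rest' = (done ++ [c]) ++ rest' := by simp
        have hlenout : ((done ++ c :: rest') : List (Option String)).length = done.length + (c :: rest').length := by simp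
        have hfj : findJ (done ++ c :: rest') (done.length + (c :: rest').length) (cleanCell c) (done.length + 1)
            = done.length + 1 + run.length := by
          rw [← hlenout]
          rw [findJ_eq (done ++ c :: rest') (cleanCell c) ((done ++ c :: rest').length) (done.length + 1)
            (by omega) (by simp)]
          have hdrop : (done ++ c :: rest').drop (done.length + 1) = rest' := by
            rw [hout]
            exact List.drop_left' (by simp)
          rw [hdrop]
        rw [aLoop_step ml (done.length + (c :: rest').length) fuel done.length (done ++ c :: rest')
          (done.length + 1 + run.length) (by simp) (by rw [hgd]; exact hcur) (by rw [hgd]; exact hfj.symm)]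
        rw [hgd]
        have hj2 : done.length + 1 + run.length - done.length = 1 + run.length := by omega
        rw [hj2]
        have hlsum : run.length + rest₂.length = rest'.length := by
          rw [hrundef, hrest2def, ← List.length_append, hsplit]
        have hrunmem : ∀ x ∈ run, cleanCell x = cleanCell c := by
          intro x hx
          have := List.mem_takeWhile_imp hx
          simpa [hp] using this
        have hhead2 : ∀ d, rest₂.head? = some d → (cleanCell c = "" ∨ ¬ (cleanCell d = cleanCell c)) := by
          intro d hd
          right
          have := head?_dropWhile_not p rest' d hd
          simpa [hp] using this
        have hkeepc : ¬ (¬ (cleanCell c = "") ∧ cleanCell c = prev ∧ ml ≤ (PySem.Str.len (cleanCell c) : Int)) := by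
          rcases hhead c rfl with h | h
          · intro hc; rw [h] at hc; exact hcur hc.2.1
          · intro hc; exact h hc.2.1
        by_cases hcond : 2 ≤ 1 + run.length ∧ ml ≤ (PySem.Str.len (cleanCell c) : Int)
        · rw [if_pos hcond]
          have hclear : clearK (done ++ c :: rest') (done.length + 1) (done.length + 1 + run.length)
              = (done ++ [c]) ++ run.map (fun _ => (some "" : Option String)) ++ rest₂ := by
            have h0 : done ++ c :: rest' = (done ++ [c]) ++ run ++ rest₂ := by
              rw [hout, ← hsplit]; simp
            rw [h0]
            have h1 := clearK_spec run rest₂ (done ++ [c])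
            have hl : ((done ++ [c]) : List (Option String)).length = done.length + 1 := by simp
            rw [hl] at h1
            exact h1
          rw [hclear]
          set done₂ := (done ++ [c]) ++ run.map (fun _ => (some "" : Option String)) with hd2
          have hld2 : done₂.length = done.length + 1 + run.length := by simp [hd2]; omega
          have hlen2 : done.length + (c :: rest').length = done₂.length + rest₂.length := by
            simp [hd2]; omega
          rw [hlen2, ← hld2]
          have hassoc : (done ++ [c]) ++ run.map (fun _ => (some "" : Option String)) ++ rest₂ = done₂ ++ rest₂ := by
            simp [hd2]
          rw [hassoc]
          rw [ih rest₂ done₂ (cleanCell c) (by simp at hf; omega) hhead2]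
          rw [bGo, if_neg hkeepc]
          have hb : bGo ml (cleanCell c) rest' = run.map (fun _ => (some "" : Option String)) ++ bGo ml (cleanCell c) rest₂ := by
            rw [← hsplit]
            exact bGo_run_clear ml (cleanCell c) run rest₂ hrunmem hcur hcond.2
          rw [hb]
          simp [hd2]
        · rw [if_neg hcond]
          set done₂ := (done ++ [c]) ++ run with hd2
          have hld2 : done₂.length = done.length + 1 + run.length := by simp [hd2]; omega
          have hlen2 : done.length + (c :: rest').length = done₂.length + rest₂.length := by
            simp [hd2]; omega
          have h0 : done ++ c :: rest' = done₂ ++ rest₂ := by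
            rw [hout, ← hsplit]; simp [hd2]
          rw [hlen2, ← hld2, h0]
          rw [ih rest₂ done₂ (cleanCell c) (by simp at hf; omega) hhead2]
          rw [bGo, if_neg hkeepc]
          have hb : bGo ml (cleanCell c) rest' = run ++ bGo ml (cleanCell c) rest₂ := by
            have hr : run = [] ∨ ¬ ml ≤ (PySem.Str.len (cleanCell c) : Int) := by
              cases hre : run with
              | nil => exact Or.inl rfl
              | cons a t =>
                refine Or.inr (fun hl => hcond ⟨?_, hl⟩)
                rw [hre]
                simp
                omega

            rcases hr with hr | hr
            · rw [← hsplit, hr]; simp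
            · rw [← hsplit]
              exact bGo_run_keep ml (cleanCell c) run rest₂ hrunmem hr
          rw [hb]
          simp [hd2]

-- ===== VERDICT (by name: the statement is the Claim_ definition above) =====
theorem collapse_repeated_long_cells_py_spec : Claim_equal_collapse_repeated_long_cells_py := by
  intro cells min_len _
  unfold Spec_collapse_repeated_long_cells_py collapse_repeated_long_cells_py collapse_repeated_long_cells_py_alt
  have h := aLoop_main min_len cells.length cells [] "" (le_refl _) (fun c _ => Or.inl rfl)
  simpa using h
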